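-- pv_equiv track=rewrite | github.com/tjsdud594/Algorithm | test.py | solution
-- ===== SOURCE A (Python) =====
-- def solution(prices):
--     answer = [0] * len(prices)   #len(prices) : 5
--
--     for i in range(len(prices)):   # i는 range(5) = 0, 1, 2, 3, 4 범위
--         for j in range(i+1, len(prices)):    # i = 0 일땐 j in range(1, 5) -> j = 1, 2, 3, 4 -> prices[0]1 > prices[1,2,3,4]2323 (else)-> answer = 1+1+1+1 = 4
--                                              # i = 1 일땐 j in range(2, 5) -> j = 2, 3, 4 -> prices[1]2 > prices[2, 3, 4]323 (else)-> answer = 1+1+1 = 3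
--                                              # i = 2 일땐 j in range(3, 5) -> j = 3, 4 -> prices[2]3 > prices[3, 4]23 ->break (answer = 1)
--                                              # i = 3 일땐 j in range(4, 5) -> j = 4 -> prices[3]2 > prices[4]3 (else)-> answer = 1
--                                              # i = 4 일땐 j in range(5, 5) -> j = 존재하지 않으므로 상위 for문으로 돌아감 -> i의 범위가 끝났으므로 answer을 리턴 따라서 answer의 마지막 값은 0가 유지됨.
--             if prices[i] > prices[j]:
--                 answer[i] = 1
--                 break
--             else:
--                 answer[i] += 1
--     return answer
-- ===== SOURCE B (Python) =====
-- def solution(prices):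
--     # One right-to-left pass with a running suffix minimum:
--     # answer[i] = 1 if some later price is smaller, else the number of remaining prices.
--     ans = []
--     m = None          # min of prices[i+1:]
--     k = 0             # len(prices) - 1 - i
--     for p in reversed(prices):
--         if m is not None and m < p:
--             ans.append(1)
--         else:
--             ans.append(k)
--         if m is None or p < m:
--             m = p
--         k += 1
--     ans.reverse()
--     return ans
-- ===== Notes on version B (the rewrite author's own statement) =====
-- stated objective: faster
-- what changed: Replaced the quadratic per-index forward scan with a single right-to-left pass keeping a running suffix minimum: answer[i]=1 if that minimum is below prices[i], else the count of remaining elements.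
import Mathlib
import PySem

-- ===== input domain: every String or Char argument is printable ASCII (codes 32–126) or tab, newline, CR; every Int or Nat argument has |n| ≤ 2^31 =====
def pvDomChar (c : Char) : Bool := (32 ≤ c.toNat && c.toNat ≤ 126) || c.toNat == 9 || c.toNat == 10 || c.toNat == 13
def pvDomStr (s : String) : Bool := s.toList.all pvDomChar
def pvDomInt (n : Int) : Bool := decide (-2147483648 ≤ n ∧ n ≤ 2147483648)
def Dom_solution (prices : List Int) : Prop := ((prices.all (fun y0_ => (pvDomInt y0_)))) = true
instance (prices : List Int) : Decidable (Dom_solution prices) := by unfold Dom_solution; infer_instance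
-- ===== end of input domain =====

-- B replaces A's quadratic nested scan by one right-to-left suffix-minimum pass (same return values).

-- ===== PORT A =====
-- inner loop 'for j in range(i+1, n)' on answer[i] (starts at 0; +=1 on else, set to 1 and break on drop)
def solInner (prices : List Int) (pi : Int) (js : List Nat) (acc : Int) : Int :=
  match js with
  | [] => acc
  | j :: rest =>
    if pi > (PySem.List.pyGet? prices (j : Int)).getD 0 then 1
    else solInner prices pi rest (acc + 1)

-- answer[i] is touched only during outer iteration i, so the array is the map of the rows
def solution (prices : List Int) : List Int :=
  let n := prices.length
  (List.range n).map (fun (i : Nat) =>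
    solInner prices ((PySem.List.pyGet? prices (i : Int)).getD 0) (List.range' (i + 1) (n - (i + 1))) 0)

-- ===== PORT B =====
-- the loop body of Source B: m = suffix min so far (None before any element), k = count processed, acc = answers built (reversed append = prepend)
def altGo (ps : List Int) (m : Option Int) (k : Int) (acc : List Int) : List Int :=
  match ps with
  | [] => acc
  | p :: rest =>
    let v : Int := match m with
      | some mv => if mv < p then 1 else k
      | none => k
    let m' : Option Int := match m with
      | some mv => if p < mv then some p else some mv
      | none => some p
    altGo rest m' (k + 1) (v :: acc)

def solution_alt (prices : List Int) : List Int :=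
  altGo prices.reverse none 0 []

-- ===== PRECONDITION & SPEC =====
def Spec_solution (prices : List Int) (out : List Int) : Prop := out = solution_alt prices
instance (prices : List Int) (out : List Int) : Decidable (Spec_solution prices out) := by unfold Spec_solution; infer_instance

-- ===== CLAIM (what is proved, stated in full; the proofs are below) =====
def Claim_equal_solution : Prop := ∀ (prices : List Int), Dom_solution prices → Spec_solution prices (solution prices)

-- ===== LEMMAS AND PROOFS =====

-- common reference function: each element's answer from its suffix (extra ghost suffix s)
def refF : List Int → List Int → List Int
  | [], _ => []
  | p :: rest, s =>
    (if (rest ++ s).any (fun x => decide (x < p)) then 1 else ((rest ++ s).length : Int)) :: refF rest s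

-- ---- A side ----

lemma solInner_range' (prices : List Int) (p : Int) :
    ∀ (cnt s : Nat) (acc : Int), s + cnt = prices.length →
      solInner prices p (List.range' s cnt) acc =
        (if (prices.drop s).any (fun x => decide (x < p)) then 1 else acc + ((prices.drop s).length : Int)) := by
  intro cnt
  induction cnt with
  | zero =>
    intro s acc h
    simp [solInner, List.drop_eq_nil_of_le (by omega : prices.length ≤ s)]
  | succ n ih =>
    intro s acc h
    have hs : s < prices.length := by omega
    have hdrop : prices.drop s = prices[s] :: prices.drop (s + 1) :=
      List.drop_eq_getElem_cons hs
    have hget : PySem.List.pyGet? prices (s : Int) = some prices[s] :=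
      PySem.List.pyGet?_ofNat prices s hs
    rw [List.range'_succ]
    simp only [solInner, hget, Option.getD_some]
    rw [hdrop, List.any_cons, List.length_cons]
    by_cases hlt : prices[s] < p
    · rw [if_pos (show p > prices[s] from hlt)]
      simp [hlt]
    · rw [if_neg (show ¬ p > prices[s] from hlt), ih (s + 1) (acc + 1) (by omega)]
      by_cases hany : (prices.drop (s + 1)).any (fun x => decide (x < p))
      · simp [hany, hlt]
      · simp only [hany, decide_eq_true_eq, if_neg hlt, Bool.or_false]
        simp
        ring

lemma map_G_eq_refF : ∀ l : List Int,
    (List.range l.length).map (fun i =>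
        if (l.drop (i + 1)).any (fun x => decide (x < l[i]!)) then (1 : Int)
        else ((l.drop (i + 1)).length : Int)) = refF l [] := by
  intro l
  induction l with
  | nil => simp [refF]
  | cons p rest ih =>
    rw [List.length_cons, List.range_succ_eq_map, List.map_cons, List.map_map]
    rw [show refF (p :: rest) [] =
        (if rest.any (fun x => decide (x < p)) then (1 : Int) else (rest.length : Int)) :: refF rest []
      by simp [refF]]
    congr 1

lemma solution_eq_refF (prices : List Int) : solution prices = refF prices [] := by
  rw [← map_G_eq_refF]
  unfold solution
  apply List.map_congr_left
  intro i hi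
  rw [List.mem_range] at hi
  rw [PySem.List.pyGet?_ofNat prices i hi, Option.getD_some,
    solInner_range' prices prices[i] (prices.length - (i + 1)) (i + 1) 0 (by omega)]
  rw [getElem!_pos prices i hi]
  simp

-- ---- B side ----

def omin (m : Option Int) (p : Int) : Option Int :=
  match m with
  | some mv => if p < mv then some p else some mv
  | none => some p

def minFold : List Int → Option Int → Option Int
  | [], m => m
  | p :: r, m => minFold r (omin m p)

def vals : List Int → Option Int → Int → List Int
  | [], _, _ => []
  | p :: rest, m, k =>
    (match m with
      | some mv => if mv < p then (1 : Int) else k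
      | none => k) :: vals rest (omin m p) (k + 1)

def ltP (m : Option Int) (p : Int) : Bool :=
  match m with
  | some mv => decide (mv < p)
  | none => false

lemma altGo_eq_vals (ps : List Int) : ∀ (m : Option Int) (k : Int) (acc : List Int),
    altGo ps m k acc = (vals ps m k).reverse ++ acc := by
  induction ps with
  | nil => intro m k acc; simp [altGo, vals]
  | cons p rest ih =>
    intro m k acc
    simp only [altGo, vals, ih, omin, List.reverse_cons, List.append_assoc, List.singleton_append]

lemma minFold_append (a b : List Int) : ∀ m, minFold (a ++ b) m = minFold b (minFold a m) := by
  induction a with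
  | nil => intro m; simp [minFold]
  | cons x r ih => intro m; simp [minFold, ih]

lemma vals_append (a b : List Int) : ∀ m k,
    vals (a ++ b) m k = vals a m k ++ vals b (minFold a m) (k + (a.length : Int)) := by
  induction a with
  | nil => intro m k; simp [vals, minFold]
  | cons x r ih =>
    intro m k
    simp only [List.cons_append, vals, ih, minFold, List.length_cons]
    congr 3
    push_cast
    ring

lemma ltP_omin (m : Option Int) (x p : Int) :
    ltP (omin m x) p = (decide (x < p) || ltP m p) := by
  cases m with
  | none => simp [ltP, omin]
  | some mv =>
    simp only [ltP, omin]
    by_cases h : x < mv <;> simp [h] <;> by_cases h2 : x < p <;> simp [h2] <;> omega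

lemma ltP_minFold (l : List Int) : ∀ m p,
    ltP (minFold l m) p = (l.any (fun x => decide (x < p)) || ltP m p) := by
  induction l with
  | nil => intro m p; simp [minFold]
  | cons x r ih =>
    intro m p
    simp only [minFold, List.any_cons, ih, ltP_omin]
    cases decide (x < p) <;> simp

lemma vals_head_eq (m : Option Int) (p k : Int) :
    (match m with
      | some mv => if mv < p then (1 : Int) else k
      | none => k) = (if ltP m p then (1 : Int) else k) := by
  cases m <;> simp [ltP]

lemma vals_reverse (l : List Int) : ∀ (s : List Int),
    vals l.reverse (minFold s.reverse none) (s.length : Int) = (refF l s).reverse := by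
  induction l with
  | nil => intro s; simp [vals, refF]
  | cons p rest ih =>
    intro s
    rw [List.reverse_cons, vals_append, refF, List.reverse_cons]
    congr 1
    · -- processed chunk = rest's answers, reversed
      exact ih s
    · -- the single element p
      rw [← minFold_append, ← List.reverse_append]
      simp only [vals, vals_head_eq, ltP_minFold]
      simp only [List.any_reverse, List.length_reverse, ltP, Bool.or_false]
      have hk : ((s.length : Int) + rest.length) = ((rest ++ s).length : Int) := by
        simp [List.length_append]
        omega
      rw [hk]

lemma solution_alt_eq_refF (prices : List Int) : solution_alt prices = refF prices [] := by
  unfold solution_alt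
  rw [altGo_eq_vals]
  have h := vals_reverse prices []
  simp only [List.reverse_nil, minFold, List.length_nil, Int.natCast_zero] at h
  rw [h, List.append_nil, List.reverse_reverse]

-- ===== VERDICT (by name: the statement is the Claim_ definition above) =====
theorem solution_spec : Claim_equal_solution := by
  intro prices _
  unfold Spec_solution
  rw [solution_eq_refF, solution_alt_eq_refF]
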